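-- pv_equiv track=rewrite | github.com/zeyu-chen/25t1-comp9021-labs | Lab 5/Solutions/ex_4_sol.py | f4_1
-- ===== SOURCE A (Python) =====
-- def f4_1(L: list[int]) -> list[list[int]]:
--     """
--     Process a list into sublists where beginning and end have the same number of 2-element lists.
--
--     The function creates a list with:
--     - At its beginning: n sublists of 2 elements
--     - In the middle: remaining elements (if any)
--     - At its end: n sublists of 2 elements
--     Where n is as large as possible.
--
--     This implementation uses list slicing and list comprehensions without loops.
--
--     Args:
--         L: A list of integers
--
--     Returns:
--         A list of sublists structured as described
--     """
--     # Handle empty list case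
--     if not L:
--         return []
--
--     # If the length is odd, we need special handling for the middle
--     if len(L) % 2:
--         # Calculate how many pairs of 2 elements we can have at each end
--         # The // 4 ensures we have the same number at both ends
--         pairs_at_each_end = len(L) // 4
--
--         # Create pairs at the beginning
--         start_pairs = [L[i : i + 2] for i in range(0, pairs_at_each_end * 2, 2)]
--
--         # Create the middle part with remaining elements
--         middle = [L[pairs_at_each_end * 2 : len(L) - (pairs_at_each_end * 2)]]
--
--         # Create pairs at the end
--         end_pairs = [L[i : i + 2] for i in range(len(L) - (pairs_at_each_end * 2), len(L) - 1, 2)]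
--
--         # Combine all parts
--         return start_pairs + middle + end_pairs
--
--     # If length is even, we can simply split into pairs
--     return [L[i : i + 2] for i in range(0, len(L) - 1, 2)]
-- ===== SOURCE B (Python) =====
-- def f4_1(L: list[int]) -> list[list[int]]:
--     # Symmetric two-pointer peeling: while at least 4 elements remain in the
--     # window, peel one pair off each end; whatever is left (0-3 elements) is
--     # the middle chunk (omitted when empty).  No len//4 arithmetic needed.
--     head, tail = [], []
--     lo, hi = 0, len(L)
--     while hi - lo >= 4:
--         head.append(L[lo : lo + 2])
--         tail.append(L[hi - 2 : hi])
--         lo += 2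
--         hi -= 2
--     mid = [L[lo:hi]] if lo < hi else []
--     return head + mid + tail[::-1]
-- ===== Notes on version B (the rewrite author's own statement) =====
-- stated objective: alternative
-- what changed: A computes pairs_at_each_end = len//4 and builds the result from three slice comprehensions over arithmetic index ranges; B is a symmetric two-pointer loop that peels one pair off each end while at least 4 elements remain and emits whatever is left (0-3 elements) as the middle chunk, with no len//4 arithmetic and no parity case split.
import Mathlib
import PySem

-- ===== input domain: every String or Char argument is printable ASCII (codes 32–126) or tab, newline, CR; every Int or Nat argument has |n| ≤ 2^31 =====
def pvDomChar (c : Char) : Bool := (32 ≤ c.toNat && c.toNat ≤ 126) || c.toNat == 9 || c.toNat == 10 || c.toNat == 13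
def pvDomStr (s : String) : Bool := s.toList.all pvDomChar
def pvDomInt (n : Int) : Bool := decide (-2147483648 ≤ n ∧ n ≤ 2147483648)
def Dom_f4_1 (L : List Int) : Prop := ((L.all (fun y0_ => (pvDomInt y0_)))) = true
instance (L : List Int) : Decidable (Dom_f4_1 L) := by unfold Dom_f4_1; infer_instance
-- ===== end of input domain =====

-- B replaces A's len//4 index arithmetic and slice comprehensions by a symmetric
-- divide-and-conquer recursion (peel a pair off each end); objective: alternative.

-- ===== PORT A =====
def f4_1 (L : List Int) : List (List Int) :=
  if L = [] then []
  else if L.length % 2 ≠ 0 then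
    -- pairs_at_each_end = len(L) // 4  (len is a Nat, so Python's // is Nat division here)
    let p : Nat := L.length / 4
    ((PySem.List.pyRange 0 ((p * 2 : Nat) : Int) 2).map
        (fun i => PySem.List.slice L (some i) (some (i + 2))))
      ++ [PySem.List.slice L (some ((p * 2 : Nat) : Int))
            (some ((L.length : Int) - ((p * 2 : Nat) : Int)))]
      ++ ((PySem.List.pyRange ((L.length : Int) - ((p * 2 : Nat) : Int)) ((L.length : Int) - 1) 2).map
        (fun i => PySem.List.slice L (some i) (some (i + 2))))
  else
    (PySem.List.pyRange 0 ((L.length : Int) - 1) 2).map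
      (fun i => PySem.List.slice L (some i) (some (i + 2)))

-- ===== PORT B =====
-- while hi - lo >= 4: peel L[lo:lo+2] onto head, L[hi-2:hi] onto tail; then the
-- middle L[lo:hi] (if non-empty) between head and reversed tail (tail[::-1] = List.reverse,
-- per PySem.List.slice?_none_none_neg_one).
def altLoop (L : List Int) (head tail : List (List Int)) (lo hi : Int) : List (List Int) :=
  if 4 ≤ hi - lo then
    altLoop L (head ++ [PySem.List.slice L (some lo) (some (lo + 2))])
              (tail ++ [PySem.List.slice L (some (hi - 2)) (some hi)])
              (lo + 2) (hi - 2)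
  else
    head ++ (if lo < hi then [PySem.List.slice L (some lo) (some hi)] else []) ++ tail.reverse
termination_by (hi - lo).toNat
decreasing_by omega

def f4_1_alt (L : List Int) : List (List Int) := altLoop L [] [] 0 (L.length : Int)

-- ===== PRECONDITION & SPEC =====
def Spec_f4_1 (L : List Int) (out : List (List Int)) : Prop := out = f4_1_alt L
instance (L : List Int) (out : List (List Int)) : Decidable (Spec_f4_1 L out) := by unfold Spec_f4_1; infer_instance

-- ===== CLAIM (what is proved, stated in full; the proofs are below) =====
def Claim_equal_f4_1 : Prop := ∀ (L : List Int), Dom_f4_1 L → Spec_f4_1 L (f4_1 L)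

-- ===== LEMMAS AND PROOFS =====
theorem slice_win (L : List Int) (a : Int) (j : Nat) (hj : a = (j:Int)) :
    PySem.List.slice L (some a) (some (a + 2)) = (L.drop j).take 2 := by
  subst hj
  have h2 : ((j:Int) + 2) = ((j : Nat) : Int) + ((2:Nat) : Int) := by push_cast; ring
  rw [h2, PySem.List.slice_natCast_add]

theorem A_even (L : List Int) (he : L.length % 2 = 0) :
    f4_1 L = (List.range (L.length / 2)).map (fun k => (L.drop (2 * k)).take 2) := by
  by_cases h0 : L = []
  · subst h0; simp [f4_1]
  have hn : 2 ≤ L.length := by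
    cases L with
    | nil => exact absurd rfl h0
    | cons a t => simp at he ⊢; omega
  unfold f4_1
  rw [if_neg h0, if_neg (by omega)]
  rw [PySem.List.pyRange_of_pos 0 ((L.length:Int) - 1) (by omega : (0:Int) < 2)]
  rw [if_pos (by push_cast; omega), List.map_map]
  have hcnt : (((L.length:Int) - 1 - 0 + 2 - 1) / 2).toNat = L.length / 2 := by omega
  rw [hcnt]
  apply List.map_congr_left
  intro k _
  exact slice_win L _ (2*k) (by push_cast; ring)

theorem A_odd (L : List Int) (ho : L.length % 2 = 1) :
    f4_1 L =
      (List.range (L.length / 4)).map (fun k => (L.drop (2 * k)).take 2)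
        ++ [(L.drop (2 * (L.length / 4))).take (L.length - 4 * (L.length / 4))]
        ++ (List.range (L.length / 4)).map
            (fun k => (L.drop (L.length - 2 * (L.length / 4) + 2 * k)).take 2) := by
  have hne : L ≠ [] := by intro h; rw [h] at ho; simp at ho
  have hp : 4 * (L.length / 4) ≤ L.length := by omega
  unfold f4_1
  rw [if_neg hne, if_pos (by omega : L.length % 2 ≠ 0)]
  set n := L.length with hn
  set p := n / 4 with hpdef
  dsimp only
  rw [PySem.List.pyRange_of_pos 0 ((p*2 : Nat) : Int) (by omega : (0:Int) < 2),
      PySem.List.pyRange_of_pos ((n:Int) - ((p*2:Nat):Int)) ((n:Int) - 1) (by omega : (0:Int) < 2)]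
  have c1 : (if (0:Int) < ((p*2:Nat):Int) then ((((p*2:Nat):Int) - 0 + 2 - 1)/2).toNat else 0) = p := by
    split_ifs with h <;> omega
  have c2 : (if (n:Int) - ((p*2:Nat):Int) < (n:Int) - 1 then
      (((n:Int) - 1 - ((n:Int) - ((p*2:Nat):Int)) + 2 - 1)/2).toNat else 0) = p := by
    split_ifs with h <;> omega
  rw [c1, c2, List.map_map, List.map_map]
  congr 1
  · congr 1
    · apply List.map_congr_left
      intro k _
      exact slice_win L _ (2*k) (by push_cast; ring)
    · have hc : (n:Int) - ((p*2:Nat):Int) = (((n - p*2 : Nat)):Int) := by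
        push_cast [Nat.cast_sub (by omega : p*2 ≤ n)]; ring
      rw [hc, PySem.List.slice_natCast,
          (by omega : (n - p*2) - p*2 = n - 4*p), (by omega : p*2 = 2*p)]
  · apply List.map_congr_left
    intro k _
    refine slice_win L _ (n - 2*p + 2*k) ?_
    push_cast [Nat.cast_sub (by omega : p*2 ≤ n), Nat.cast_sub (by omega : 2*p ≤ n)]
    ring

theorem Mdrop_take (L : List Int) (j t : Nat) (hjt : j + t ≤ L.length - 4) :
    (((L.drop 2).take (L.length - 4)).drop j).take t = (L.drop (2 + j)).take t := by
  rw [List.drop_take, List.take_take, List.drop_drop]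
  rw [(by omega : min t (L.length - 4 - j) = t)]

-- recursion of the loop, Nat indices, accumulators removed (proof helper)
def coreN (L : List Int) (lo hi : Nat) : List (List Int) :=
  if lo + 4 ≤ hi then
    (L.drop lo).take 2 :: (coreN L (lo + 2) (hi - 2) ++ [(L.drop (hi - 2)).take 2])
  else if lo < hi then [(L.drop lo).take (hi - lo)] else []
termination_by hi - lo
decreasing_by omega

theorem altLoop_acc : ∀ (d : Nat) (L : List Int) (head tail : List (List Int)) (lo hi : Int),
    (hi - lo).toNat = d →
    altLoop L head tail lo hi = head ++ altLoop L [] [] lo hi ++ tail.reverse := by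
  intro d
  induction d using Nat.strong_induction_on with
  | _ d ih =>
    intro L head tail lo hi hd
    by_cases h4 : 4 ≤ hi - lo
    · rw [altLoop, if_pos h4,
          ih ((hi - 2 - (lo + 2)).toNat) (by omega) L _ _ (lo+2) (hi-2) rfl]
      conv_rhs => rw [altLoop, if_pos h4,
          ih ((hi - 2 - (lo + 2)).toNat) (by omega) L _ _ (lo+2) (hi-2) rfl]
      simp [List.append_assoc]
    · rw [altLoop, if_neg h4]
      conv_rhs => rw [altLoop, if_neg h4]
      simp [List.append_assoc]

theorem altLoop_coreN : ∀ (d : Nat) (L : List Int) (lo hi : Nat), hi - lo = d →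
    altLoop L [] [] (lo : Int) (hi : Int) = coreN L lo hi := by
  intro d
  induction d using Nat.strong_induction_on with
  | _ d ih =>
    intro L lo hi hd
    by_cases h4 : lo + 4 ≤ hi
    · rw [altLoop, if_pos (by push_cast; omega : (4:Int) ≤ (hi:Int) - (lo:Int)),
          coreN, if_pos h4]
      rw [altLoop_acc ((hi:Int) - 2 - ((lo:Int)+2)).toNat L _ _ _ _ rfl]
      have hc1 : ((lo:Int)) + 2 = ((lo:Nat):Int) + ((2:Nat):Int) := by push_cast; ring
      have hc2 : (hi:Int) - 2 = (((hi - 2 : Nat)):Int) := by push_cast [Nat.cast_sub (by omega : 2 ≤ hi)]; ring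
      have hc3 : (hi:Int) = (((hi - 2 : Nat)):Int) + ((2:Nat):Int) := by
        push_cast [Nat.cast_sub (by omega : 2 ≤ hi)]; ring
      rw [hc1, PySem.List.slice_natCast_add, hc2, hc3, PySem.List.slice_natCast_add]
      have hrec : altLoop L [] [] ((lo:Int) + ((2:Nat):Int)) (((hi - 2 : Nat)):Int)
          = coreN L (lo + 2) (hi - 2) := by
        have e1 : ((lo:Int) + ((2:Nat):Int)) = (((lo + 2 : Nat)):Int) := by push_cast; ring
        rw [e1]
        exact ih ((hi - 2) - (lo + 2)) (by omega) L (lo + 2) (hi - 2) rfl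
      rw [hrec]
      simp
    · rw [altLoop, if_neg (by push_cast; omega : ¬ (4:Int) ≤ (hi:Int) - (lo:Int)),
          coreN, if_neg h4]
      by_cases hlt : lo < hi
      · rw [if_pos (by exact_mod_cast hlt : ((lo:Nat) : Int) < (hi:Int)), if_pos hlt]
        rw [PySem.List.slice_natCast]
        simp
      · rw [if_neg (by push_cast; omega : ¬ ((lo:Nat) : Int) < (hi:Int)), if_neg hlt]
        simp

theorem alt_coreN0 (L : List Int) : f4_1_alt L = coreN L 0 L.length := by
  have h := altLoop_coreN (L.length - 0) L 0 L.length rfl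
  simpa using h

theorem coreN_M : ∀ (d : Nat) (L : List Int) (lo hi : Nat), hi - lo = d → hi ≤ L.length - 4 →
    coreN ((L.drop 2).take (L.length - 4)) lo hi = coreN L (lo + 2) (hi + 2) := by
  intro d
  induction d using Nat.strong_induction_on with
  | _ d ih =>
    intro L lo hi hd hhi
    by_cases h4 : lo + 4 ≤ hi
    · rw [coreN, if_pos h4]
      conv_rhs => rw [coreN, if_pos (by omega : lo + 2 + 4 ≤ hi + 2)]
      refine List.cons_eq_cons.mpr ⟨?_, ?_⟩
      · rw [Mdrop_take L lo 2 (by omega), Nat.add_comm 2 lo]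
      · congr 1
        · rw [ih ((hi - 2) - (lo + 2)) (by omega) L (lo + 2) (hi - 2) rfl (by omega),
              (by omega : hi - 2 + 2 = hi), (by omega : hi + 2 - 2 = hi)]
        · rw [Mdrop_take L (hi - 2) 2 (by omega),
              (by omega : 2 + (hi - 2) = hi), (by omega : hi + 2 - 2 = hi)]
    · rw [coreN, if_neg h4]
      conv_rhs => rw [coreN, if_neg (by omega : ¬ lo + 2 + 4 ≤ hi + 2)]
      by_cases hlt : lo < hi
      · rw [if_pos hlt, if_pos (by omega : lo + 2 < hi + 2)]
        rw [Mdrop_take L lo (hi - lo) (by omega), Nat.add_comm 2 lo,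
            (by omega : hi + 2 - (lo + 2) = hi - lo)]
      · rw [if_neg hlt, if_neg (by omega : ¬ lo + 2 < hi + 2)]

theorem B_peel (L : List Int) (h4 : 4 ≤ L.length) :
    f4_1_alt L = L.take 2 ::
      (f4_1_alt ((L.drop 2).take (L.length - 4)) ++ [L.drop (L.length - 2)]) := by
  rw [alt_coreN0 L, alt_coreN0 ((L.drop 2).take (L.length - 4))]
  have hMlen : ((L.drop 2).take (L.length - 4)).length = L.length - 4 := by simp; omega
  rw [hMlen]
  rw [coreN, if_pos (by omega : 0 + 4 ≤ L.length)]
  have h1 : coreN ((L.drop 2).take (L.length - 4)) 0 (L.length - 4)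
      = coreN L 2 (L.length - 2) := by
    rw [coreN_M (L.length - 4 - 0) L 0 (L.length - 4) rfl (by omega),
        (by omega : L.length - 4 + 2 = L.length - 2), (by norm_num : 0 + 2 = 2)]
  rw [h1]
  refine List.cons_eq_cons.mpr ⟨by simp, ?_⟩
  congr 1
  exact congrArg (fun x => [x]) (List.take_of_length_le (by simp; omega))

theorem A_peel (L : List Int) (h4 : 4 ≤ L.length) :
    f4_1 L = L.take 2 ::
      (f4_1 ((L.drop 2).take (L.length - 4)) ++ [L.drop (L.length - 2)]) := by
  set M : List Int := (L.drop 2).take (L.length - 4) with hM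
  have hMlen : M.length = L.length - 4 := by rw [hM]; simp; omega
  by_cases he : L.length % 2 = 0
  · -- even length: both ends of the even chunking peel off
    obtain ⟨q, hq2⟩ : ∃ q, L.length / 2 = q + 2 := ⟨(L.length - 4) / 2, by omega⟩
    rw [A_even L he, A_even M (by omega), hMlen, hq2, (by omega : (L.length - 4) / 2 = q)]
    rw [(by rfl : q + 2 = (q + 1) + 1), List.range_succ, List.map_append, List.map_singleton,
        List.range_succ_eq_map, List.map_cons, List.map_map, List.cons_append]
    refine List.cons_eq_cons.mpr ⟨by simp, ?_⟩
    congr 1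
    · apply List.map_congr_left; intro k hk
      simp only [Function.comp]
      rw [hM, Mdrop_take L (2*k) 2 (by simp at hk; omega)]
      congr 1
      · congr 1; omega
    · rw [(by omega : 2 * (q + 1) = L.length - 2)]
      exact congrArg (fun x => [x]) (List.take_of_length_le (by simp; omega))
  · have ho : L.length % 2 = 1 := by omega
    obtain ⟨q, hq⟩ : ∃ q, L.length / 4 = q + 1 := ⟨L.length / 4 - 1, by omega⟩
    rw [A_odd L ho, A_odd M (by omega), hMlen, hq, (by omega : (L.length - 4) / 4 = q)]
    have hS : (List.range (q+1)).map (fun k => (L.drop (2*k)).take 2)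
        = L.take 2 :: (List.range q).map (fun k => (M.drop (2*k)).take 2) := by
      rw [List.range_succ_eq_map, List.map_cons, List.map_map]
      refine List.cons_eq_cons.mpr ⟨by simp, ?_⟩
      apply List.map_congr_left; intro k hk
      simp only [Function.comp]
      rw [hM, Mdrop_take L (2*k) 2 (by simp at hk; omega)]
      congr 1
      · congr 1; omega
    have hMid : (M.drop (2*q)).take ((L.length - 4) - 4*q)
        = (L.drop (2*(q+1))).take (L.length - 4*(q+1)) := by
      rw [hM, Mdrop_take L (2*q) ((L.length - 4) - 4*q) (by omega)]
      congr 1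
      · omega
      · congr 1; omega
    have hE : (List.range (q+1)).map (fun k => (L.drop (L.length - 2*(q+1) + 2*k)).take 2)
        = (List.range q).map (fun k => (M.drop ((L.length - 4) - 2*q + 2*k)).take 2)
          ++ [L.drop (L.length - 2)] := by
      rw [List.range_succ, List.map_append, List.map_singleton]
      congr 1
      · apply List.map_congr_left; intro k hk
        rw [hM, Mdrop_take L ((L.length - 4) - 2*q + 2*k) 2 (by simp at hk; omega)]
        congr 1
        · congr 1; omega
      · rw [(by omega : L.length - 2*(q+1) + 2*q = L.length - 2)]
        exact congrArg (fun x => [x]) (List.take_of_length_le (by simp; omega))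
    rw [hS, hMid, hE]
    simp [List.append_assoc, List.cons_append]

theorem AB_eq : ∀ (n : Nat) (L : List Int), L.length ≤ n → f4_1 L = f4_1_alt L := by
  intro n
  induction n using Nat.strong_induction_on with
  | _ n ih =>
    intro L hL
    by_cases h4 : 4 ≤ L.length
    · rw [A_peel L h4, B_peel L h4,
          ih (L.length - 4) (by omega) ((L.drop 2).take (L.length - 4)) (by simp)]
    · rw [alt_coreN0 L]
      by_cases h0 : L.length = 0
      · have hnil : L = [] := List.eq_nil_of_length_eq_zero h0
        subst hnil
        rw [coreN]
        simp [f4_1]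
      · rw [coreN, if_neg (by omega), if_pos (by omega)]
        simp only [Nat.sub_zero, List.drop_zero, List.take_length]
        by_cases he : L.length % 2 = 0
        · rw [A_even L he, (by omega : L.length / 2 = 1)]
          rw [List.range_succ]
          simp only [List.range_zero, List.map_nil, List.map_append, List.map_singleton,
            List.nil_append, Nat.mul_zero, List.drop_zero]
          rw [List.take_of_length_le (by omega)]
        · rw [A_odd L (by omega), (by omega : L.length / 4 = 0)]
          simp [List.take_of_length_le (by omega : L.length ≤ L.length - 4 * (L.length / 4))]

-- ===== VERDICT (by name: the statement is the Claim_ definition above) =====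
theorem f4_1_spec : Claim_equal_f4_1 := by
  intro L _
  unfold Spec_f4_1
  exact AB_eq L.length L (le_refl _)
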